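-- pv_equiv track=rewrite | github.com/Ag3497120/verantyx-v6 | synth_results/ce9e57f2.py | transform
-- ===== SOURCE A (Python) =====
-- def transform(grid):
--     rows,cols=len(grid),len(grid[0])
--     g=[list(row) for row in grid]
--     bar_starts={}
--     for c in range(cols):
--         s=[r for r in range(rows) if grid[r][c]==2]
--         if s: bar_starts[c]=min(s)
--     if not bar_starts: return grid
--     sv=sorted(set(bar_starts.values()))
--     if len(sv)<2: return grid
--     min_s=sv[0]; thr=sv[1]
--     for c,s in bar_starts.items():
--         if s==min_s:
--             for r in range(thr,rows):
--                 if g[r][c]==2: g[r][c]=8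
--     return g
-- ===== SOURCE B (Python) =====
-- def transform(grid):
--     rows, cols = len(grid), len(grid[0])
--     # min_s: first row (top-down) containing a 2 in the first cols columns
--     min_s = next((r for r in range(rows)
--                   if any(v == 2 for v in grid[r][:cols])), None)
--     if min_s is None:
--         return grid
--     # thr: first row containing a 2 in a column that is blank (non-2) at row min_s;
--     # that row is exactly the second-smallest per-column bar start
--     thr = next((r for r in range(rows)
--                 if any(grid[r][c] == 2 and grid[min_s][c] != 2
--                        for c in range(cols))), None)
--     if thr is None:
--         return grid
--     return [[8 if r >= thr and c < cols and grid[min_s][c] == 2 and v == 2 else v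
--              for c, v in enumerate(row)]
--             for r, row in enumerate(grid)]
-- ===== Notes on version B (the rewrite author's own statement) =====
-- stated objective: alternative
-- what changed: B never computes per-column bar starts: where A builds a dict of per-column minimum 2-rows and sorts the set of its values, B finds min_s as the first row containing a 2 and thr as the first row containing a 2 in a column that is not 2 at row min_s (two whole-grid row scans), then rebuilds the grid functionally, recoloring 2-cells with r>=thr in columns that hold a 2 at row min_s.
import Mathlib
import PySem

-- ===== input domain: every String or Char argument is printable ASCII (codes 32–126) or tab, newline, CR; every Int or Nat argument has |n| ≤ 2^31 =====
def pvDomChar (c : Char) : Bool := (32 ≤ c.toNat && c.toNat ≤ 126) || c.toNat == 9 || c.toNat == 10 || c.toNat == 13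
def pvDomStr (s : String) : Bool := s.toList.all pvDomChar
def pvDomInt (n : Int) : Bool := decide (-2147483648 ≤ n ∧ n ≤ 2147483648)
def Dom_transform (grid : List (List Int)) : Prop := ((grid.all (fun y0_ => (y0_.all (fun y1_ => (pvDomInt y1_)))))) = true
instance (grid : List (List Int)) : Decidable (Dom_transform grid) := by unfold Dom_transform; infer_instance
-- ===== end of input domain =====

-- B drops A's per-column-start dict and sorted value set: it finds the first row holding a 2 and
-- the first row holding a 2 in a column blank at that row, then rebuilds the grid functionally
-- (alternative decomposition; return value only — A also works on a copy, so neither mutates its argument).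

-- ===== PORT A =====
def transform (grid : List (List Int)) : List (List Int) :=
  let rows : Int := grid.length
  let cols : Int := (PySem.List.pyGetD grid 0 []).length
  let g : List (List Int) := grid.map (fun row => row)
  let bar_starts : PySem.Dict Int Int :=
    (PySem.List.pyRange 0 cols 1).foldl (fun d c =>
      let s := (PySem.List.pyRange 0 rows 1).filter
        (fun r => PySem.List.pyGetD (PySem.List.pyGetD grid r []) c 0 == 2)
      if s ≠ [] then d.insert c ((PySem.List.min? s (fun x => x)).getD 0) else d)
      PySem.Dict.empty
  if bar_starts.items = [] then grid
  else
    let sv : List Int :=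
      PySem.List.sorted (PySem.Set.ofList bar_starts.values) (fun x => x) false
    if sv.length < 2 then grid
    else
      let min_s : Int := PySem.List.pyGetD sv 0 0
      let thr : Int := PySem.List.pyGetD sv 1 0
      bar_starts.items.foldl (fun g p =>
        if p.2 == min_s then
          (PySem.List.pyRange thr rows 1).foldl (fun g r =>
            if PySem.List.pyGetD (PySem.List.pyGetD g r []) p.1 0 == 2 then
              PySem.List.pySetD g r (PySem.List.pySetD (PySem.List.pyGetD g r []) p.1 8)
            else g) g
        else g) g

-- ===== PORT B =====
def transform_alt (grid : List (List Int)) : List (List Int) :=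
  let rows : Int := grid.length
  let cols : Int := (PySem.List.pyGetD grid 0 []).length
  match (PySem.List.pyRange 0 rows 1).find? (fun r =>
      (PySem.List.slice (PySem.List.pyGetD grid r []) none (some cols)).any (fun v => v == 2)) with
  | none => grid
  | some min_s =>
    match (PySem.List.pyRange 0 rows 1).find? (fun r =>
        (PySem.List.pyRange 0 cols 1).any (fun c =>
          PySem.List.pyGetD (PySem.List.pyGetD grid r []) c 0 == 2 &&
          !(PySem.List.pyGetD (PySem.List.pyGetD grid min_s []) c 0 == 2))) with
    | none => grid
    | some thr =>
      (PySem.List.enumerate grid 0).map (fun q =>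
        (PySem.List.enumerate q.2 0).map (fun p =>
          if thr ≤ q.1 ∧ p.1 < cols ∧
             PySem.List.pyGetD (PySem.List.pyGetD grid min_s []) p.1 0 = 2 ∧ p.2 = 2
          then 8 else p.2))

-- ===== PRECONDITION & SPEC =====
-- Pre_ excludes exactly the inputs on which A raises IndexError: the empty grid (len(grid[0]))
-- and grids where some row is shorter than row 0 (grid[r][c] with c < len(grid[0])).
def Pre_transform (grid : List (List Int)) : Prop :=
  grid ≠ [] ∧ ∀ row ∈ grid, (PySem.List.pyGetD grid 0 []).length ≤ row.length
instance (grid : List (List Int)) : Decidable (Pre_transform grid) := by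
  unfold Pre_transform; infer_instance
def pvWitness_transform : List (List Int) := [[2, 0], [0, 2], [2, 2]]
def Spec_transform (grid : List (List Int)) (out : List (List Int)) : Prop := out = transform_alt grid
instance (grid : List (List Int)) (out : List (List Int)) : Decidable (Spec_transform grid out) := by
  unfold Spec_transform; infer_instance

-- ===== CLAIM (what is proved, stated in full; the proofs are below) =====
def Claim_equal_transform : Prop :=
  ∀ (grid : List (List Int)), Dom_transform grid → Pre_transform grid →
    Spec_transform grid (transform grid)

-- ===== LEMMAS AND PROOFS =====

set_option maxHeartbeats 1000000

-- proof-only helper names for the pieces of both ports (definitionally equal to the ports' lets)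
def pvR (grid : List (List Int)) : Int := (grid.length : Int)
def pvC (grid : List (List Int)) : Int := ((PySem.List.pyGetD grid 0 []).length : Int)
def pvCell (g : List (List Int)) (r c : Int) : Int :=
  PySem.List.pyGetD (PySem.List.pyGetD g r []) c 0
def pvS (grid : List (List Int)) (c : Int) : List Int :=
  (PySem.List.pyRange 0 (pvR grid) 1).filter
    (fun r => PySem.List.pyGetD (PySem.List.pyGetD grid r []) c 0 == 2)
def pvVal (grid : List (List Int)) (c : Int) : Int :=
  (PySem.List.min? (pvS grid c) (fun x => x)).getD 0
def pvDictA (grid : List (List Int)) : PySem.Dict Int Int :=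
  (PySem.List.pyRange 0 (pvC grid) 1).foldl
    (fun d c => if pvS grid c ≠ [] then d.insert c (pvVal grid c) else d) PySem.Dict.empty
def pvSv (grid : List (List Int)) : List Int :=
  PySem.List.sorted (PySem.Set.ofList (pvDictA grid).values) (fun x => x) false
def pvInner (grid : List (List Int)) (a c : Int) (g : List (List Int)) : List (List Int) :=
  (PySem.List.pyRange a (pvR grid) 1).foldl
    (fun g r => if pvCell g r c == 2 then
        PySem.List.pySetD g r (PySem.List.pySetD (PySem.List.pyGetD g r []) c 8) else g) g
def pvPaintA (grid : List (List Int)) (m thr : Int) : List (List Int) :=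
  (pvDictA grid).items.foldl
    (fun g p => if p.2 == m then pvInner grid thr p.1 g else g) (grid.map (fun row => row))
def pvP1 (grid : List (List Int)) (r : Int) : Bool :=
  (PySem.List.slice (PySem.List.pyGetD grid r []) none (some (pvC grid))).any (fun v => v == 2)
def pvM (grid : List (List Int)) : Option Int :=
  (PySem.List.pyRange 0 (pvR grid) 1).find? (pvP1 grid)
def pvP2 (grid : List (List Int)) (m r : Int) : Bool :=
  (PySem.List.pyRange 0 (pvC grid) 1).any (fun c =>
    PySem.List.pyGetD (PySem.List.pyGetD grid r []) c 0 == 2 &&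
    !(PySem.List.pyGetD (PySem.List.pyGetD grid m []) c 0 == 2))
def pvT (grid : List (List Int)) (m : Int) : Option Int :=
  (PySem.List.pyRange 0 (pvR grid) 1).find? (pvP2 grid m)
def pvPaintB (grid : List (List Int)) (m thr : Int) : List (List Int) :=
  (PySem.List.enumerate grid 0).map (fun q =>
    (PySem.List.enumerate q.2 0).map (fun p =>
      if thr ≤ q.1 ∧ p.1 < pvC grid ∧ pvCell grid m p.1 = 2 ∧ p.2 = 2 then 8 else p.2))
def pvPresent (grid : List (List Int)) : List Int :=
  ((PySem.List.pyRange 0 (pvC grid) 1).filter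
    (fun c => decide (pvS grid c ≠ []))).map (fun c => pvVal grid c)
def pvShape (g grid : List (List Int)) : Prop :=
  g.length = grid.length ∧
  ∀ (i : Nat) (h1 : i < g.length) (h2 : i < grid.length), (g[i]).length = (grid[i]).length

lemma pv_transform_eq (grid : List (List Int)) :
    transform grid =
      if (pvDictA grid).items = [] then grid
      else if (pvSv grid).length < 2 then grid
      else pvPaintA grid (PySem.List.pyGetD (pvSv grid) 0 0)
             (PySem.List.pyGetD (pvSv grid) 1 0) := rfl

lemma pv_transform_alt_eq (grid : List (List Int)) :
    transform_alt grid =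
      match pvM grid with
      | none => grid
      | some m =>
        match pvT grid m with
        | none => grid
        | some thr => pvPaintB grid m thr := rfl

-- min of a strictly increasing list is its head
lemma pv_min?_cons (x : Int) (t : List Int) (hp : (x :: t).Pairwise (· < ·)) :
    PySem.List.min? (x :: t) (fun y => y) = some x := by
  have hfold := PySem.List.foldl_min_le t x
  have hlt : ∀ y ∈ t, x < y := (List.pairwise_cons.mp hp).1
  rcases PySem.List.foldl_min_mem t x with h1 | h1
  · rw [PySem.List.min?_id_cons, h1]
  · have h2 := hlt _ h1
    have h3 := hfold.1
    omega

-- a fold of guarded inserts of fresh distinct keys appends its items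
lemma pv_fold_insert_items (cond : Int → Prop) [DecidablePred cond] (val : Int → Int) :
    ∀ (l : List Int) (d : PySem.Dict Int Int), l.Nodup →
      (∀ c ∈ l, d.contains c = false) →
      (l.foldl (fun d c => if cond c then d.insert c (val c) else d) d).items
        = d.items ++ (l.filter (fun c => decide (cond c))).map (fun c => (c, val c)) := by
  intro l
  induction l with
  | nil => intro d _ _; simp
  | cons x t ih =>
    intro d hnd hfresh
    simp only [List.foldl_cons]
    by_cases hx : cond x
    · rw [if_pos hx]
      have hfx : d.contains x = false := hfresh x (by simp)
      have h1 : ∀ c ∈ t, (d.insert x (val x)).contains c = false := by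
        intro c hc
        rw [PySem.Dict.contains_insert]
        have hne : c ≠ x := by
          rintro rfl; exact (List.nodup_cons.mp hnd).1 hc
        simp [hne, hfresh c (List.mem_cons_of_mem _ hc)]
      rw [ih _ (List.nodup_cons.mp hnd).2 h1,
          PySem.Dict.items_insert_of_not_contains _ _ hfx]
      simp [hx]
    · rw [if_neg hx, ih _ (List.nodup_cons.mp hnd).2
        (fun c hc => hfresh c (List.mem_cons_of_mem _ hc))]
      simp [hx]

lemma pv_itemsA (grid : List (List Int)) :
    (pvDictA grid).items
      = ((PySem.List.pyRange 0 (pvC grid) 1).filter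
          (fun c => decide (pvS grid c ≠ []))).map (fun c => (c, pvVal grid c)) := by
  have h := pv_fold_insert_items (fun c => pvS grid c ≠ []) (pvVal grid)
    (PySem.List.pyRange 0 (pvC grid) 1) PySem.Dict.empty
    (PySem.List.nodup_pyRange_one 0 (pvC grid))
    (fun c _ => PySem.Dict.contains_empty c)
  simpa [pvDictA] using h

lemma pv_values_eq (grid : List (List Int)) : (pvDictA grid).values = pvPresent grid := by
  have hv : (pvDictA grid).values = (pvDictA grid).items.map (fun p => p.2) := rfl
  rw [hv, pv_itemsA, List.map_map, pvPresent]
  rfl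

lemma pv_items_nil_iff (grid : List (List Int)) :
    (pvDictA grid).items = [] ↔ pvPresent grid = [] := by
  rw [pv_itemsA, pvPresent]
  simp

lemma pv_pairwise_S (grid : List (List Int)) (c : Int) :
    (pvS grid c).Pairwise (· < ·) :=
  List.Pairwise.filter _ (PySem.List.pairwise_lt_pyRange_one 0 (pvR grid))

lemma pv_val_min_some (grid : List (List Int)) (c : Int) (h : pvS grid c ≠ []) :
    PySem.List.min? (pvS grid c) (fun x => x) = some (pvVal grid c) := by
  obtain ⟨x, t, hx⟩ := List.exists_cons_of_ne_nil h
  have hp : (x :: t).Pairwise (· < ·) := hx ▸ pv_pairwise_S grid c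
  rw [pvVal, hx, pv_min?_cons x t hp]
  rfl

lemma pv_val_mem (grid : List (List Int)) (c : Int) (h : pvS grid c ≠ []) :
    pvVal grid c ∈ pvS grid c :=
  PySem.List.min?_mem (pv_val_min_some grid c h)

lemma pv_val_le (grid : List (List Int)) (c : Int) (h : pvS grid c ≠ []) :
    ∀ r ∈ pvS grid c, pvVal grid c ≤ r :=
  PySem.List.min?_isMin (pv_val_min_some grid c h)

lemma pv_mem_S (grid : List (List Int)) (c r : Int) :
    r ∈ pvS grid c ↔ (r ∈ PySem.List.pyRange 0 (pvR grid) 1 ∧ pvCell grid r c = 2) := by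
  rw [pvS, List.mem_filter, pvCell]
  simp

lemma pv_mem_present (grid : List (List Int)) (v : Int) :
    v ∈ pvPresent grid ↔
      ∃ c : Int, 0 ≤ c ∧ c < pvC grid ∧ pvS grid c ≠ [] ∧ pvVal grid c = v := by
  rw [pvPresent]
  constructor
  · intro h
    obtain ⟨c, hc, rfl⟩ := List.mem_map.mp h
    have hm := List.mem_filter.mp hc
    have hb := PySem.List.mem_pyRange_one.mp hm.1
    exact ⟨c, hb.1, hb.2, by simpa using hm.2, rfl⟩
  · rintro ⟨c, h0, hC, hne, rfl⟩
    exact List.mem_map.mpr ⟨c, List.mem_filter.mpr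
      ⟨PySem.List.mem_pyRange_one.mpr ⟨h0, hC⟩, by simpa using hne⟩, rfl⟩

-- find? on a strictly increasing list returns the least satisfying element
lemma pv_find?_min {p : Int → Bool} (l : List Int) (hpw : l.Pairwise (· < ·))
    {m : Int} (h : l.find? p = some m) : ∀ x ∈ l, p x = true → m ≤ x := by
  induction l with
  | nil => simp at h
  | cons y t ih =>
    intro x hx hpx
    cases hy : p y with
    | true =>
      rw [List.find?_cons, hy] at h
      have hm : m = y := by simpa using h.symm
      subst hm
      rcases List.mem_cons.mp hx with rfl | hxt
      · exact le_refl _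
      · exact le_of_lt ((List.pairwise_cons.mp hpw).1 x hxt)
    | false =>
      rw [List.find?_cons, hy] at h
      rcases List.mem_cons.mp hx with rfl | hxt
      · rw [hy] at hpx; exact absurd hpx (by simp)
      · exact ih (List.pairwise_cons.mp hpw).2 h x hxt hpx

lemma pv_P1_iff (grid : List (List Int)) (r : Int) :
    pvP1 grid r = true ↔ ∃ c : Int, 0 ≤ c ∧ c < pvC grid ∧ pvCell grid r c = 2 := by
  have hC0 : (0 : Int) ≤ pvC grid := Int.natCast_nonneg _
  rw [pvP1, PySem.List.slice_to _ hC0, List.any_eq_true]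
  constructor
  · rintro ⟨v, hv, hv2⟩
    obtain ⟨j, hj, hjv⟩ := List.mem_take_iff_getElem.mp hv
    have hjc : j < (pvC grid).toNat := lt_of_lt_of_le hj (min_le_left _ _)
    have hjl : j < (PySem.List.pyGetD grid r []).length := lt_of_lt_of_le hj (min_le_right _ _)
    refine ⟨(j : Int), Int.natCast_nonneg _, by simp only [pvC] at hjc ⊢; omega, ?_⟩
    rw [pvCell, PySem.List.pyGetD_eq_getElem _ 0 (Int.natCast_nonneg _) (by exact_mod_cast hjl)]
    simp only [Int.toNat_natCast]
    rw [hjv]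
    simpa using hv2
  · rintro ⟨c, h0, hC, hcell⟩
    have hlen : c.toNat < (PySem.List.pyGetD grid r []).length := by
      by_contra hge
      rw [pvCell, PySem.List.pyGetD_of_nonneg _ _ h0, List.getD_eq_getElem?_getD,
        List.getElem?_eq_none (by omega)] at hcell
      simp at hcell
    refine ⟨2, List.mem_take_iff_getElem.mpr
      ⟨c.toNat, by simp only [pvC] at hC ⊢; omega, ?_⟩, by simp⟩
    rw [← hcell, pvCell, PySem.List.pyGetD_eq_getElem _ 0 h0 (by omega)]

lemma pv_P2_iff (grid : List (List Int)) (m r : Int) :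
    pvP2 grid m r = true ↔
      ∃ c : Int, 0 ≤ c ∧ c < pvC grid ∧ pvCell grid r c = 2 ∧ pvCell grid m c ≠ 2 := by
  rw [pvP2, List.any_eq_true]
  constructor
  · rintro ⟨c, hc, hcond⟩
    have hb := PySem.List.mem_pyRange_one.mp hc
    simp at hcond
    exact ⟨c, hb.1, hb.2, hcond.1, hcond.2⟩
  · rintro ⟨c, h0, hC, h2, hn2⟩
    refine ⟨c, PySem.List.mem_pyRange_one.mpr ⟨h0, hC⟩, ?_⟩
    simp only [pvCell] at h2 hn2
    simp [h2, hn2]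

-- with m minimal among the per-column starts, a column starts at m iff its cell at row m is 2
lemma pv_cellm_iff (grid : List (List Int)) (m : Int)
    (hmmem : m ∈ PySem.List.pyRange 0 (pvR grid) 1)
    (hmin : ∀ v ∈ pvPresent grid, m ≤ v)
    (c : Int) (h0 : 0 ≤ c) (hC : c < pvC grid) :
    pvCell grid m c = 2 ↔ (pvS grid c ≠ [] ∧ pvVal grid c = m) := by
  constructor
  · intro hcell
    have hmS : m ∈ pvS grid c := (pv_mem_S grid c m).mpr ⟨hmmem, hcell⟩
    have hne : pvS grid c ≠ [] := List.ne_nil_of_mem hmS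
    have h1 : pvVal grid c ≤ m := pv_val_le grid c hne m hmS
    have h2 : m ≤ pvVal grid c :=
      hmin _ ((pv_mem_present grid _).mpr ⟨c, h0, hC, hne, rfl⟩)
    exact ⟨hne, le_antisymm h1 h2⟩
  · rintro ⟨hne, hval⟩
    have := pv_val_mem grid c hne
    rw [hval] at this
    exact ((pv_mem_S grid c m).mp this).2

-- reading through a single row update, arbitrary nonnegative index
lemma pv_getD_set {α : Type} (xs : List α) (n : Nat) (v : α) (i : Int) (d : α)
    (hi : 0 ≤ i) (hn : n < xs.length) :
    PySem.List.pyGetD (PySem.List.pySetD xs (n : Int) v) i d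
      = if i = (n : Int) then v else PySem.List.pyGetD xs i d := by
  have h := PySem.List.pyGetD_pySetD_natCast xs n i.toNat v d hn
  rw [show ((i.toNat : Nat) : Int) = i by omega] at h
  rw [h]
  by_cases hin : i = (n : Int)
  · rw [if_pos (by omega), if_pos hin]
  · rw [if_neg (by omega), if_neg hin]

lemma pv_inner_spec (grid : List (List Int))
    (hrl : ∀ row ∈ grid, (PySem.List.pyGetD grid 0 []).length ≤ row.length)
    (c : Int) (hc0 : 0 ≤ c) (hcC : c < pvC grid) :
    ∀ (n : Nat) (a : Int), 0 ≤ a → (pvR grid - a).toNat = n →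
      ∀ g : List (List Int), pvShape g grid →
      pvShape (pvInner grid a c g) grid ∧
      ∀ r c' : Int, 0 ≤ r → 0 ≤ c' →
        pvCell (pvInner grid a c g) r c' =
          if a ≤ r ∧ r < pvR grid ∧ c' = c ∧ pvCell g r c = 2 then 8 else pvCell g r c' := by
  intro n
  have hRdef : pvR grid = (grid.length : Int) := rfl
  induction n with
  | zero =>
    intro a ha hn g hs
    have hnil : PySem.List.pyRange a (pvR grid) 1 = [] :=
      PySem.List.pyRange_one_eq_nil (by omega)
    have hid : pvInner grid a c g = g := by
      rw [pvInner, hnil]; rfl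
    rw [hid]
    refine ⟨hs, ?_⟩
    intro r c' _ _
    rw [if_neg]
    rintro ⟨h1, h2, _, _⟩; omega
  | succ n ih =>
    intro a ha hn g hs
    have haR : a < pvR grid := by omega
    have hstep : pvInner grid a c g
        = pvInner grid (a + 1) c
            (if pvCell g a c == 2 then
              PySem.List.pySetD g a (PySem.List.pySetD (PySem.List.pyGetD g a []) c 8) else g) := by
      rw [pvInner, pvInner, PySem.List.pyRange_one_cons haR, List.foldl_cons]
    set g' := (if pvCell g a c == 2 then
        PySem.List.pySetD g a (PySem.List.pySetD (PySem.List.pyGetD g a []) c 8) else g) with hg'def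
    have haN : a.toNat < grid.length := by omega
    have haNg : a.toNat < g.length := by rw [hs.1]; exact haN
    have hrowg : PySem.List.pyGetD g a [] = g[a.toNat] :=
      PySem.List.pyGetD_eq_getElem g [] ha (by omega)
    have hCdef : pvC grid = ((PySem.List.pyGetD grid 0 []).length : Int) := rfl
    have hrowlen : (PySem.List.pyGetD grid 0 []).length ≤ (g[a.toNat]'haNg).length := by
      have h2 := hs.2 a.toNat haNg haN
      have h3 := hrl (grid[a.toNat]'haN) (List.getElem_mem haN)
      omega
    have hcN : c.toNat < (g[a.toNat]'haNg).length := by omega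
    have hcell' : ∀ r c' : Int, 0 ≤ r → 0 ≤ c' →
        pvCell g' r c' = if r = a ∧ c' = c ∧ pvCell g a c = 2 then 8 else pvCell g r c' := by
      intro r c' hr0 hc'0
      by_cases h2 : pvCell g a c = 2
      · rw [hg'def, if_pos (by simpa using h2)]
        have ha' : a = ((a.toNat : Nat) : Int) := by omega
        have hc' : c = ((c.toNat : Nat) : Int) := by omega
        rw [pvCell]
        rw [show PySem.List.pySetD g a (PySem.List.pySetD (PySem.List.pyGetD g a []) c 8)
              = PySem.List.pySetD g ((a.toNat : Nat) : Int)
                  (PySem.List.pySetD (g[a.toNat]'haNg) ((c.toNat : Nat) : Int) 8) by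
            rw [← ha', ← hc', hrowg]]
        rw [pv_getD_set g a.toNat _ r [] hr0 haNg]
        by_cases hra : r = a
        · rw [if_pos (by omega)]
          rw [pv_getD_set (g[a.toNat]'haNg) c.toNat 8 c' 0 hc'0 hcN]
          by_cases hcc : c' = c
          · rw [if_pos (by omega), if_pos ⟨hra, hcc, h2⟩]
          · rw [if_neg (by omega), if_neg (by rintro ⟨_, h, _⟩; exact hcc h)]
            rw [pvCell, hra, hrowg]
        · rw [if_neg (by omega), if_neg (by rintro ⟨h, _, _⟩; exact hra h)]
          rfl
      · have : g' = g := by rw [hg'def, if_neg (by simpa using h2)]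
        rw [this, if_neg (by rintro ⟨_, _, h⟩; exact h2 h)]
    have hs' : pvShape g' grid := by
      by_cases h2 : pvCell g a c = 2
      · rw [hg'def, if_pos (by simpa using h2)]
        constructor
        · rw [PySem.List.length_pySetD, hs.1]
        · intro i h1 h2'
          simp only [PySem.List.pySetD_of_nonneg g _ ha] at h1 ⊢
          rw [List.getElem_set]
          by_cases hia : a.toNat = i
          · rw [if_pos hia, PySem.List.length_pySetD, hrowg]
            subst hia
            exact hs.2 a.toNat haNg haN
          · rw [if_neg hia]
            exact hs.2 i (by simpa [PySem.List.length_pySetD] using h1) h2'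
      · rw [hg'def, if_neg (by simpa using h2)]; exact hs
    obtain ⟨ihs, ihcell⟩ := ih (a + 1) (by omega) (by omega) g' hs'
    rw [hstep]
    refine ⟨ihs, ?_⟩
    intro r c' hr0 hc'0
    rw [ihcell r c' hr0 hc'0, hcell' r c' hr0 hc'0, hcell' r c hr0 hc0]
    by_cases hra : r = a
    · subst hra
      rw [if_neg (by rintro ⟨h, _⟩; omega)]
      by_cases hcc : c' = c
      · subst hcc
        by_cases h2 : pvCell g r c' = 2
        · rw [if_pos ⟨rfl, rfl, h2⟩, if_pos ⟨le_refl r, haR, rfl, h2⟩]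
        · rw [if_neg (by rintro ⟨_, _, h⟩; exact h2 h),
              if_neg (by rintro ⟨_, _, _, h⟩; exact h2 h)]
      · rw [if_neg (by rintro ⟨_, h, _⟩; exact hcc h),
            if_neg (by rintro ⟨_, _, h, _⟩; exact hcc h)]
    · rw [if_neg (c := r = a ∧ c = c ∧ pvCell g a c = 2)
            (by rintro ⟨h, _, _⟩; exact hra h),
          if_neg (c := r = a ∧ c' = c ∧ pvCell g a c = 2)
            (by rintro ⟨h, _, _⟩; exact hra h)]
      by_cases hcond : a ≤ r ∧ r < pvR grid ∧ c' = c ∧ pvCell g r c = 2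
      · rw [if_pos ⟨by omega, hcond.2⟩, if_pos hcond]
      · rw [if_neg (by rintro ⟨h1, hX⟩; exact hcond ⟨by omega, hX⟩), if_neg hcond]

lemma pv_outer_spec (grid : List (List Int))
    (hrl : ∀ row ∈ grid, (PySem.List.pyGetD grid 0 []).length ≤ row.length)
    (m thr : Int) (hthr0 : 0 ≤ thr) :
    ∀ (its : List (Int × Int)) (g : List (List Int)), pvShape g grid →
      (∀ p ∈ its, 0 ≤ p.1 ∧ p.1 < pvC grid) →
      (its.map Prod.fst).Nodup →
      (∀ p ∈ its, ∀ r : Int, 0 ≤ r → pvCell g r p.1 = pvCell grid r p.1) →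
      pvShape (its.foldl (fun g p => if p.2 == m then pvInner grid thr p.1 g else g) g) grid ∧
      ∀ r c' : Int, 0 ≤ r → 0 ≤ c' →
        pvCell (its.foldl (fun g p => if p.2 == m then pvInner grid thr p.1 g else g) g) r c' =
          if (c', m) ∈ its ∧ thr ≤ r ∧ r < pvR grid ∧ pvCell grid r c' = 2 then 8
          else pvCell g r c' := by
  intro its
  induction its with
  | nil =>
    intro g hs _ _ _
    refine ⟨hs, ?_⟩
    intro r c' _ _
    rw [List.foldl_nil, if_neg (by rintro ⟨h, _⟩; simp at h)]
  | cons p its' ih =>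
    intro g hs hkeys hnd hinv
    simp only [List.foldl_cons]
    have hnd' : (p.1 :: its'.map Prod.fst).Nodup := by
      rw [List.map_cons] at hnd; exact hnd
    have hndt : (its'.map Prod.fst).Nodup := (List.nodup_cons.mp hnd').2
    have hhead : p.1 ∉ its'.map Prod.fst := (List.nodup_cons.mp hnd').1
    by_cases hpm : p.2 = m
    · rw [if_pos (by simpa using hpm)]
      obtain ⟨his, hicell⟩ := pv_inner_spec grid hrl p.1 (hkeys p (by simp)).1
        (hkeys p (by simp)).2 (pvR grid - thr).toNat thr hthr0 rfl g hs
      have hinv' : ∀ q ∈ its', ∀ r : Int, 0 ≤ r →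
          pvCell (pvInner grid thr p.1 g) r q.1 = pvCell grid r q.1 := by
        intro q hq r hr
        have hq0 := (hkeys q (by simp [hq])).1
        rw [hicell r q.1 hr hq0]
        have hne : q.1 ≠ p.1 := by
          intro h
          exact hhead (List.mem_map.mpr ⟨q, hq, h⟩)
        rw [if_neg (by rintro ⟨_, _, h, _⟩; exact hne h)]
        exact hinv q (by simp [hq]) r hr
      obtain ⟨hos, hocell⟩ := ih (pvInner grid thr p.1 g) his
        (fun q hq => hkeys q (by simp [hq])) hndt hinv'
      refine ⟨hos, ?_⟩
      intro r c' hr hc'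
      rw [hocell r c' hr hc', hicell r c' hr hc']
      have hgp : pvCell g r p.1 = pvCell grid r p.1 := hinv p (by simp) r hr
      by_cases h1 : (c', m) ∈ its' ∧ thr ≤ r ∧ r < pvR grid ∧ pvCell grid r c' = 2
      · rw [if_pos h1, if_pos ⟨List.mem_cons_of_mem _ h1.1, h1.2⟩]
      · rw [if_neg h1]
        by_cases h2 : thr ≤ r ∧ r < pvR grid ∧ c' = p.1 ∧ pvCell g r p.1 = 2
        · rw [if_pos h2, if_pos]
          refine ⟨List.mem_cons.mpr (Or.inl ?_), h2.1, h2.2.1, ?_⟩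
          · have : p = (c', m) := Prod.ext (h2.2.2.1).symm hpm
            rw [this]
          · rw [h2.2.2.1, ← hgp]; exact h2.2.2.2
        · rw [if_neg h2, if_neg]
          rintro ⟨hmem, hthr, hR, hcell⟩
          rcases List.mem_cons.mp hmem with heq | hmem'
          · apply h2
            have hp1 : p.1 = c' := by rw [← heq]
            refine ⟨hthr, hR, hp1.symm, ?_⟩
            rw [hgp, hp1]; exact hcell
          · exact h1 ⟨hmem', hthr, hR, hcell⟩
    · rw [if_neg (by simpa using hpm)]
      obtain ⟨hos, hocell⟩ := ih g hs (fun q hq => hkeys q (by simp [hq])) hndt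
        (fun q hq r hr => hinv q (by simp [hq]) r hr)
      refine ⟨hos, ?_⟩
      intro r c' hr hc'
      rw [hocell r c' hr hc']
      by_cases h1 : (c', m) ∈ its' ∧ thr ≤ r ∧ r < pvR grid ∧ pvCell grid r c' = 2
      · rw [if_pos h1, if_pos ⟨List.mem_cons_of_mem _ h1.1, h1.2⟩]
      · rw [if_neg h1, if_neg]
        rintro ⟨hmem, rest⟩
        rcases List.mem_cons.mp hmem with heq | hmem'
        · apply hpm; rw [← heq]
        · exact h1 ⟨hmem', rest⟩

lemma pv_paintA_spec (grid : List (List Int))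
    (hrl : ∀ row ∈ grid, (PySem.List.pyGetD grid 0 []).length ≤ row.length)
    (m thr : Int) (hthr0 : 0 ≤ thr) :
    pvShape (pvPaintA grid m thr) grid ∧
    ∀ r c' : Int, 0 ≤ r → 0 ≤ c' →
      pvCell (pvPaintA grid m thr) r c' =
        if (c', m) ∈ (pvDictA grid).items ∧ thr ≤ r ∧ r < pvR grid ∧ pvCell grid r c' = 2 then 8
        else pvCell grid r c' := by
  have hkeys : ∀ p ∈ (pvDictA grid).items, 0 ≤ p.1 ∧ p.1 < pvC grid := by
    rw [pv_itemsA]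
    intro p hp
    obtain ⟨c, hc, rfl⟩ := List.mem_map.mp hp
    exact PySem.List.mem_pyRange_one.mp (List.mem_filter.mp hc).1
  have hnd : ((pvDictA grid).items.map Prod.fst).Nodup := by
    rw [pv_itemsA, List.map_map]
    have : (Prod.fst ∘ fun c => (c, pvVal grid c)) = fun c => c := rfl
    rw [this]
    simpa using List.Nodup.filter _ (PySem.List.nodup_pyRange_one 0 (pvC grid))
  have hbase : pvShape grid grid := ⟨rfl, fun i _ _ => rfl⟩
  have h := pv_outer_spec grid hrl m thr hthr0 (pvDictA grid).items grid hbase hkeys hnd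
    (fun p _ r _ => rfl)
  have hmap : grid.map (fun row => row) = grid := by simp
  rw [pvPaintA, hmap]
  exact h

lemma pv_cell_getElem (g : List (List Int)) (i j : Nat) (hi : i < g.length)
    (hj : j < (g[i]'hi).length) :
    pvCell g (i : Int) (j : Int) = (g[i]'hi)[j]'hj := by
  simp only [pvCell]
  rw [PySem.List.pyGetD_eq_getElem g [] (Int.natCast_nonneg _) (by exact_mod_cast hi)]
  simp only [Int.toNat_natCast]
  rw [PySem.List.pyGetD_eq_getElem _ 0 (Int.natCast_nonneg _) (by exact_mod_cast hj)]
  simp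

lemma pv_paint_eq (grid : List (List Int))
    (hrl : ∀ row ∈ grid, (PySem.List.pyGetD grid 0 []).length ≤ row.length)
    (m thr : Int) (hthr0 : 0 ≤ thr)
    (hmmem : m ∈ PySem.List.pyRange 0 (pvR grid) 1)
    (hmin : ∀ v ∈ pvPresent grid, m ≤ v) :
    pvPaintA grid m thr = pvPaintB grid m thr := by
  obtain ⟨⟨hlenA, hrowA⟩, hcellA⟩ := pv_paintA_spec grid hrl m thr hthr0
  have hRdef : pvR grid = (grid.length : Int) := rfl
  have hlenB : (pvPaintB grid m thr).length = grid.length := by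
    simp [pvPaintB, PySem.List.length_enumerate]
  apply List.ext_getElem (by omega)
  intro i h1 h2
  have hiG : i < grid.length := by omega
  have hrowlenA : ((pvPaintA grid m thr)[i]'h1).length = (grid[i]'hiG).length :=
    hrowA i h1 hiG
  apply List.ext_getElem
  · rw [hrowlenA]
    simp [pvPaintB, List.getElem_map, PySem.List.getElem_enumerate,
      PySem.List.length_enumerate]
  intro j hj1 hj2
  have hjG : j < (grid[i]'hiG).length := by omega
  have hAcell : ((pvPaintA grid m thr)[i]'h1)[j]'hj1
      = pvCell (pvPaintA grid m thr) (i : Int) (j : Int) :=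
    (pv_cell_getElem _ i j h1 hj1).symm
  have hGcell : pvCell grid (i : Int) (j : Int) = (grid[i]'hiG)[j]'hjG :=
    pv_cell_getElem grid i j hiG hjG
  have hBcell : ((pvPaintB grid m thr)[i]'h2)[j]'hj2
      = (if thr ≤ (0 + (i : Int)) ∧ (0 + (j : Int)) < pvC grid ∧
            pvCell grid m (0 + (j : Int)) = 2 ∧ (grid[i]'hiG)[j]'hjG = 2
        then 8 else (grid[i]'hiG)[j]'hjG) := by
    simp only [pvPaintB, List.getElem_map, PySem.List.getElem_enumerate]
  rw [hAcell, hBcell, hcellA (i : Int) (j : Int) (Int.natCast_nonneg _) (Int.natCast_nonneg _), hGcell]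
  have hmemA : ((j : Int), m) ∈ (pvDictA grid).items ↔
      ((j : Int) < pvC grid ∧ pvS grid (j : Int) ≠ [] ∧ pvVal grid (j : Int) = m) := by
    rw [pv_itemsA]
    constructor
    · intro h
      obtain ⟨cx, hcx, heq⟩ := List.mem_map.mp h
      have hc1 : cx = (j : Int) := congrArg Prod.fst heq
      have hval : pvVal grid (j : Int) = m := by
        rw [← hc1]; exact congrArg Prod.snd heq
      have hmf := List.mem_filter.mp hcx
      refine ⟨hc1 ▸ (PySem.List.mem_pyRange_one.mp hmf.1).2, hc1 ▸ (by simpa using hmf.2), hval⟩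
    · rintro ⟨hjC, hne, hval⟩
      apply List.mem_map.mpr
      refine ⟨(j : Int), List.mem_filter.mpr
        ⟨PySem.List.mem_pyRange_one.mpr ⟨Int.natCast_nonneg _, hjC⟩, by simpa using hne⟩, by rw [hval]⟩
  have hcond : (((j : Int), m) ∈ (pvDictA grid).items ∧ thr ≤ (i : Int) ∧
        (i : Int) < pvR grid ∧ (grid[i]'hiG)[j]'hjG = 2) ↔
      (thr ≤ (0 + (i : Int)) ∧ (0 + (j : Int)) < pvC grid ∧
        pvCell grid m (0 + (j : Int)) = 2 ∧ (grid[i]'hiG)[j]'hjG = 2) := by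
    rw [zero_add, zero_add]
    constructor
    · rintro ⟨hmem, hthr, _, hc2⟩
      obtain ⟨hjC, hne, hval⟩ := hmemA.mp hmem
      refine ⟨hthr, hjC, ?_, hc2⟩
      exact (pv_cellm_iff grid m hmmem hmin (j : Int) (Int.natCast_nonneg _) hjC).mpr ⟨hne, hval⟩
    · rintro ⟨hthr, hjC, hcm, hc2⟩
      obtain ⟨hne, hval⟩ :=
        (pv_cellm_iff grid m hmmem hmin (j : Int) (Int.natCast_nonneg _) hjC).mp hcm
      exact ⟨hmemA.mpr ⟨hjC, hne, hval⟩, hthr, by omega, hc2⟩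
  exact if_congr hcond rfl rfl

-- ===== VERDICT (by name: the statement is the Claim_ definition above) =====
theorem transform_spec : Claim_equal_transform := by
  intro grid hdom hpre
  obtain ⟨h0, hrl⟩ := hpre
  unfold Spec_transform
  rw [pv_transform_eq, pv_transform_alt_eq]
  have hsv : pvSv grid
      = PySem.List.sorted (PySem.Set.ofList (pvPresent grid)) (fun x => x) false := by
    rw [pvSv, pv_values_eq]
  have hpwsv : (pvSv grid).Pairwise (· < ·) := by
    rw [hsv]; exact PySem.List.sorted_ofList_pairwise_lt (pvPresent grid)
  have hmem : ∀ x : Int, x ∈ pvSv grid ↔ x ∈ pvPresent grid := by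
    intro x
    rw [hsv, PySem.List.mem_sorted, PySem.Set.mem_ofList]
  cases hM : pvM grid with
  | none =>
    have hnone := List.find?_eq_none.mp hM
    have hP : pvPresent grid = [] := by
      by_contra hne
      obtain ⟨v, hv⟩ := List.exists_mem_of_ne_nil _ hne
      obtain ⟨c, hc0, hcC, hSne, hval⟩ := (pv_mem_present grid v).mp hv
      have hvS : v ∈ pvS grid c := hval ▸ pv_val_mem grid c hSne
      obtain ⟨hvr, hvc⟩ := (pv_mem_S grid c v).mp hvS
      exact hnone v hvr ((pv_P1_iff grid v).mpr ⟨c, hc0, hcC, hvc⟩)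
    rw [if_pos ((pv_items_nil_iff grid).mpr hP)]
  | some m =>
    have hmmem : m ∈ PySem.List.pyRange 0 (pvR grid) 1 := List.mem_of_find?_eq_some hM
    have hmP1 : pvP1 grid m = true := List.find?_some hM
    have hmfirst : ∀ r ∈ PySem.List.pyRange 0 (pvR grid) 1, pvP1 grid r = true → m ≤ r :=
      pv_find?_min _ (PySem.List.pairwise_lt_pyRange_one 0 (pvR grid)) hM
    have hmin : ∀ v ∈ pvPresent grid, m ≤ v := by
      intro v hv
      obtain ⟨c, hc0, hcC, hSne, hval⟩ := (pv_mem_present grid v).mp hv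
      have hvS : v ∈ pvS grid c := hval ▸ pv_val_mem grid c hSne
      obtain ⟨hvr, hvc⟩ := (pv_mem_S grid c v).mp hvS
      exact hmfirst v hvr ((pv_P1_iff grid v).mpr ⟨c, hc0, hcC, hvc⟩)
    have hmPmem : m ∈ pvPresent grid := by
      obtain ⟨c, hc0, hcC, hcell⟩ := (pv_P1_iff grid m).mp hmP1
      have hmS : m ∈ pvS grid c := (pv_mem_S grid c m).mpr ⟨hmmem, hcell⟩
      have hSne : pvS grid c ≠ [] := List.ne_nil_of_mem hmS
      have h1 : pvVal grid c ≤ m := pv_val_le grid c hSne m hmS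
      have h2 : m ≤ pvVal grid c :=
        hmin _ ((pv_mem_present grid _).mpr ⟨c, hc0, hcC, hSne, rfl⟩)
      exact (pv_mem_present grid m).mpr ⟨c, hc0, hcC, hSne, le_antisymm h1 h2⟩
    have hP : pvPresent grid ≠ [] := List.ne_nil_of_mem hmPmem
    rw [if_neg (fun h => hP ((pv_items_nil_iff grid).mp h))]
    -- head of sv equals m
    have hsvne : pvSv grid ≠ [] := by
      intro hnil
      have := (hmem m).mpr hmPmem
      rw [hnil] at this; simp at this
    obtain ⟨m', t, hmt0⟩ := List.exists_cons_of_ne_nil hsvne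
    have hm'm : m' = m := by
      have h1 : m ≤ m' := hmin m' ((hmem m').mp (by rw [hmt0]; simp))
      have h2 : m' ≤ m :=
        PySem.List.key_head_sorted_le _ _ (by rw [← hsv]; exact hmt0) m
          ((PySem.Set.mem_ofList _ _).mpr hmPmem)
      omega
    have hmt : pvSv grid = m :: t := by rw [hmt0, hm'm]
    cases hT : pvT grid m with
    | none =>
      have hnone := List.find?_eq_none.mp hT
      -- every present value equals m, so sv is a singleton
      have hall : ∀ v ∈ pvPresent grid, v = m := by
        intro v hv
        by_contra hvm
        obtain ⟨c, hc0, hcC, hSne, hval⟩ := (pv_mem_present grid v).mp hv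
        have hvS : v ∈ pvS grid c := hval ▸ pv_val_mem grid c hSne
        obtain ⟨hvr, hvc⟩ := (pv_mem_S grid c v).mp hvS
        have hcm : pvCell grid m c ≠ 2 := by
          intro hcm
          exact hvm (hval ▸ ((pv_cellm_iff grid m hmmem hmin c hc0 hcC).mp hcm).2)
        exact hnone v hvr ((pv_P2_iff grid m v).mpr ⟨c, hc0, hcC, hvc, hcm⟩)
      have hlen : (pvSv grid).length < 2 := by
        rw [hmt]
        cases t with
        | nil => simp
        | cons x t' =>
          exfalso
          have hx : x ∈ pvSv grid := by rw [hmt]; simp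
          have hxm : x = m := hall x ((hmem x).mp hx)
          have := hpwsv
          rw [hmt] at this
          have hlt := (List.pairwise_cons.mp this).1 x (by simp)
          omega
      rw [if_pos hlen]
      show grid = match pvT grid m with
        | none => grid
        | some thr => pvPaintB grid m thr
      rw [hT]
    | some x =>
      have hxmem : x ∈ PySem.List.pyRange 0 (pvR grid) 1 := List.mem_of_find?_eq_some hT
      have hxP2 : pvP2 grid m x = true := List.find?_some hT
      have hxfirst : ∀ r ∈ PySem.List.pyRange 0 (pvR grid) 1, pvP2 grid m r = true → x ≤ r :=
        pv_find?_min _ (PySem.List.pairwise_lt_pyRange_one 0 (pvR grid)) hT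
      -- x ≤ every present value different from m
      have hxle : ∀ v ∈ pvPresent grid, v ≠ m → x ≤ v := by
        intro v hv hvm
        obtain ⟨c, hc0, hcC, hSne, hval⟩ := (pv_mem_present grid v).mp hv
        have hvS : v ∈ pvS grid c := hval ▸ pv_val_mem grid c hSne
        obtain ⟨hvr, hvc⟩ := (pv_mem_S grid c v).mp hvS
        have hcm : pvCell grid m c ≠ 2 := by
          intro hcm
          exact hvm (hval ▸ ((pv_cellm_iff grid m hmmem hmin c hc0 hcC).mp hcm).2)
        exact hxfirst v hvr ((pv_P2_iff grid m v).mpr ⟨c, hc0, hcC, hvc, hcm⟩)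
      -- x itself is a present value different from m
      obtain ⟨c, hc0, hcC, hxc2, hxcm⟩ := (pv_P2_iff grid m x).mp hxP2
      have hxS : x ∈ pvS grid c := (pv_mem_S grid c x).mpr ⟨hxmem, hxc2⟩
      have hSne : pvS grid c ≠ [] := List.ne_nil_of_mem hxS
      have hvalm : pvVal grid c ≠ m := by
        intro h
        exact hxcm ((pv_cellm_iff grid m hmmem hmin c hc0 hcC).mpr ⟨hSne, h⟩)
      have hvalP : pvVal grid c ∈ pvPresent grid :=
        (pv_mem_present grid _).mpr ⟨c, hc0, hcC, hSne, rfl⟩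
      have hvle : pvVal grid c ≤ x := pv_val_le grid c hSne x hxS
      have hvge : x ≤ pvVal grid c := hxle _ hvalP hvalm
      have hxval : pvVal grid c = x := by omega
      have hxP : x ∈ pvPresent grid := hxval ▸ hvalP
      have hxm : x ≠ m := hxval ▸ hvalm
      -- so sv has a second element, and it equals x
      have hxin : x ∈ pvSv grid := (hmem x).mpr hxP
      rw [hmt] at hxin
      have hxt : x ∈ t := by
        rcases List.mem_cons.mp hxin with h | h
        · exact absurd h hxm
        · exact h
      obtain ⟨x0, t', ht⟩ := List.exists_cons_of_ne_nil (List.ne_nil_of_mem hxt)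
      subst ht
      have hlen : ¬ (pvSv grid).length < 2 := by rw [hmt]; simp
      have hx0P : x0 ∈ pvPresent grid := (hmem x0).mp (by rw [hmt]; simp)
      have hpw' : (m :: x0 :: t').Pairwise (· < ·) := hmt ▸ hpwsv
      have hx0m : x0 ≠ m := by
        have := (List.pairwise_cons.mp hpw').1 x0 (by simp)
        omega
      have hxx0 : x ≤ x0 := hxle x0 hx0P hx0m
      have hx0x : x0 ≤ x := by
        rcases List.mem_cons.mp hxt with h | h
        · omega
        · have := (List.pairwise_cons.mp (List.pairwise_cons.mp hpw').2).1 x h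
          omega
      have hx0eq : x0 = x := by omega
      have hsv0 : PySem.List.pyGetD (pvSv grid) 0 0 = m := by
        rw [hmt]; exact PySem.List.pyGetD_zero_cons m _ 0
      have hsv1 : PySem.List.pyGetD (pvSv grid) 1 0 = x := by
        rw [hmt, show (1 : Int) = ((1 : Nat) : Int) from rfl, PySem.List.pyGetD_natCast]
        simp [hx0eq]
      have hx0' : 0 ≤ x := (PySem.List.mem_pyRange_one.mp hxmem).1
      rw [if_neg hlen, hsv0, hsv1]
      show pvPaintA grid m x = match pvT grid m with
        | none => grid
        | some thr => pvPaintB grid m thr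
      rw [hT]
      exact pv_paint_eq grid hrl m x hx0' hmmem hmin
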